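-- pv_equiv track=rewrite | github.com/Byongho96/algorithm_practice | Baekjoon/10713_기차_여행.py | solution
-- ===== SOURCE A (Python) =====
-- from typing import Tuple
--
-- def solution(N:int, M:int, cities:Tuple[int], costs) -> int:
--     counts = [0] * (N + 1)
--
--     # 누적합으로 처리하기 위한 마킹
--     for station in range(1, M):
--         cur = cities[station] - 1
--         prev = cities[station - 1] - 1
--         factor = 1 if prev < cur else -1
--
--         counts[prev] += factor
--         counts[cur] -= factor
--
--     # 누적합으로 처리
--     answer = 0
--     cumulative = 0
--     for i in range(N - 1):
--         cumulative += counts[i]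
--         answer += min(cumulative * costs[i][0], costs[i][2] + costs[i][1] * cumulative)
--
--     return answer
-- ===== SOURCE B (Python) =====
-- def solution(N, M, cities, costs):
--     # For each rail segment i (between city i+1 and city i+2), count directly how
--     # many consecutive journey legs pass over it, then pick per segment the cheaper
--     # of per-ride price and day-pass price.
--     total = 0
--     for i in range(N - 1):
--         uses = 0
--         for s in range(1, M):
--             a, b = cities[s - 1], cities[s]
--             if min(a, b) <= i + 1 <= max(a, b) - 1:
--                 uses += 1
--         total += min(uses * costs[i][0], costs[i][2] + costs[i][1] * uses)
--     return total
-- ===== Notes on version B (the rewrite author's own statement) =====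
-- stated objective: simpler
-- what changed: B drops A's difference-array marking and prefix-sum accumulation entirely and instead counts, for each rail segment, directly how many consecutive journey legs cross it (segment i is crossed by leg (a,b) iff min(a,b) <= i+1 < max(a,b)), then sums the per-segment minimum cost.
-- outside the precondition, e.g. on solution(3, 2, (0, 2), [[1, 1, 1], [1, 1, 1]]): A returns -1, B returns 1
import Mathlib
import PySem

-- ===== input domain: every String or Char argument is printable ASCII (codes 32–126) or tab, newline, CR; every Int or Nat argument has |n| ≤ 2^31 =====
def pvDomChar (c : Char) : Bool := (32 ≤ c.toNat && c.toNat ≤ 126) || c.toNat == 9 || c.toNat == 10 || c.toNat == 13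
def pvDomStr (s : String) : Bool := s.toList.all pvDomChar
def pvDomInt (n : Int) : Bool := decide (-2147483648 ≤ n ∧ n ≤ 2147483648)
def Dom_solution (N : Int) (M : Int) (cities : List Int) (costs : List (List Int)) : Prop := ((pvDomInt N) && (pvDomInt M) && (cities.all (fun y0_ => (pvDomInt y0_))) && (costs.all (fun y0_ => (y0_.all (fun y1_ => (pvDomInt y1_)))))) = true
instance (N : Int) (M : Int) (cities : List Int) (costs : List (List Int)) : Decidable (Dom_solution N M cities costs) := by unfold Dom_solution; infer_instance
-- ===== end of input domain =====

-- B replaces A's difference-array + prefix-sum scheme by directly counting, per rail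
-- segment, how many consecutive journey legs cross it; same return value on Pre_.

-- ===== PORT A =====
def solution (N : Int) (M : Int) (cities : List Int) (costs : List (List Int)) : Int :=
  let counts : List Int := List.replicate (N + 1).toNat 0
  let counts := (PySem.List.pyRange 1 M 1).foldl (fun counts station =>
      let cur := PySem.List.pyGetD cities station 0 - 1
      let prev := PySem.List.pyGetD cities (station - 1) 0 - 1
      let factor : Int := if prev < cur then 1 else -1
      let counts := PySem.List.pySetD counts prev (PySem.List.pyGetD counts prev 0 + factor)
      PySem.List.pySetD counts cur (PySem.List.pyGetD counts cur 0 - factor)) counts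
  ((PySem.List.pyRange 0 (N - 1) 1).foldl (fun st i =>
      let cumulative := st.2 + PySem.List.pyGetD counts i 0
      (st.1 + min (cumulative * PySem.List.pyGetD (PySem.List.pyGetD costs i []) 0 0)
                  (PySem.List.pyGetD (PySem.List.pyGetD costs i []) 2 0 +
                   PySem.List.pyGetD (PySem.List.pyGetD costs i []) 1 0 * cumulative),
       cumulative)) ((0 : Int), (0 : Int))).1

-- ===== PORT B =====
def solution_alt (N : Int) (M : Int) (cities : List Int) (costs : List (List Int)) : Int :=
  (PySem.List.pyRange 0 (N - 1) 1).foldl (fun total i =>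
    let uses := (PySem.List.pyRange 1 M 1).foldl (fun uses s =>
        let a := PySem.List.pyGetD cities (s - 1) 0
        let b := PySem.List.pyGetD cities s 0
        if min a b ≤ i + 1 ∧ i + 1 ≤ max a b - 1 then uses + 1 else uses) 0
    total + min (uses * PySem.List.pyGetD (PySem.List.pyGetD costs i []) 0 0)
                (PySem.List.pyGetD (PySem.List.pyGetD costs i []) 2 0 +
                 PySem.List.pyGetD (PySem.List.pyGetD costs i []) 1 0 * uses)) 0

-- ===== PRECONDITION & SPEC =====
-- Pre_ restricts to the problem's natural domain: when the journey has at least one leg, every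
-- listed city number lies in 1..N+1 (so its marking index is in bounds without Python's
-- negative-index wraparound), and the cost table covers the N-1 segments with 3 entries each;
-- outside it Python A either raises IndexError or returns accidental wraparound values.
def Pre_solution (N : Int) (M : Int) (cities : List Int) (costs : List (List Int)) : Prop :=
  (2 ≤ M → M ≤ (cities.length : Int) ∧ ∀ c ∈ cities.take M.toNat, 1 ≤ c ∧ c ≤ N + 1) ∧
  (N - 1).toNat ≤ costs.length ∧
  (∀ row ∈ costs.take (N - 1).toNat, 3 ≤ row.length)
instance (N : Int) (M : Int) (cities : List Int) (costs : List (List Int)) : Decidable (Pre_solution N M cities costs) := by unfold Pre_solution; infer_instance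

def pvWitness_solution : Int × Int × List Int × List (List Int) :=
  (3, 3, [1, 3, 2], [[3, 1, 1], [3, 1, 1]])

def Spec_solution (N : Int) (M : Int) (cities : List Int) (costs : List (List Int)) (out : Int) : Prop := out = solution_alt N M cities costs
instance (N : Int) (M : Int) (cities : List Int) (costs : List (List Int)) (out : Int) : Decidable (Spec_solution N M cities costs out) := by unfold Spec_solution; infer_instance

-- ===== CLAIM (what is proved, stated in full; the proofs are below) =====
def Claim_equal_solution : Prop := ∀ (N : Int) (M : Int) (cities : List Int) (costs : List (List Int)), Dom_solution N M cities costs → Pre_solution N M cities costs → Spec_solution N M cities costs (solution N M cities costs)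

-- ===== LEMMAS AND PROOFS =====

-- sum of the first m entries
def prefN (xs : List Int) (m : ℕ) : Int := (xs.take m).sum

-- indicator: leg at station s crosses segment i
def segInd (cities : List Int) (i s : Int) : Int :=
  if min (PySem.List.pyGetD cities (s - 1) 0) (PySem.List.pyGetD cities s 0) ≤ i + 1 ∧
     i + 1 ≤ max (PySem.List.pyGetD cities (s - 1) 0) (PySem.List.pyGetD cities s 0) - 1
  then 1 else 0

-- A's marking body, named for the proofs
def markBody (cities : List Int) (counts : List Int) (station : Int) : List Int :=
  let cur := PySem.List.pyGetD cities station 0 - 1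
  let prev := PySem.List.pyGetD cities (station - 1) 0 - 1
  let factor : Int := if prev < cur then 1 else -1
  let counts := PySem.List.pySetD counts prev (PySem.List.pyGetD counts prev 0 + factor)
  PySem.List.pySetD counts cur (PySem.List.pyGetD counts cur 0 - factor)

lemma sum_take_set (xs : List Int) : ∀ (k m : ℕ) (v : Int), k < xs.length →
    ((xs.set k v).take m).sum = (xs.take m).sum + (if k < m then v - xs.getD k 0 else 0) := by
  induction xs with
  | nil => intro k m v h; simp at h
  | cons x t ih =>
    intro k m v h
    cases k with
    | zero =>
      cases m with
      | zero => simp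
      | succ m => simp [List.set]; ring
    | succ k =>
      cases m with
      | zero => simp
      | succ m =>
        simp only [List.set, List.take_succ_cons, List.sum_cons, List.getD_cons_succ]
        rw [ih k m v (by simpa using h)]
        have h2 : (if k + 1 < m + 1 then v - t.getD k 0 else 0)
            = (if k < m then v - t.getD k 0 else 0) := by simp
        rw [h2]; ring

lemma getD_eq_prefN_sub (xs : List Int) : ∀ (m : ℕ), xs.getD m 0 = prefN xs (m + 1) - prefN xs m := by
  induction xs with
  | nil => intro m; simp [prefN]
  | cons x t ih =>
    intro m
    cases m with
    | zero => simp [prefN]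
    | succ m => simpa [prefN] using ih m

lemma length_markBody (cities counts : List Int) (s : Int) :
    (markBody cities counts s).length = counts.length := by
  simp [markBody, PySem.List.length_pySetD]

lemma pyGetD_toNat (xs : List Int) (j : Int) (hj : 0 ≤ j) :
    PySem.List.pyGetD xs j 0 = xs.getD j.toNat 0 := by
  have h := PySem.List.pyGetD_natCast xs j.toNat (0 : Int)
  rwa [Int.toNat_of_nonneg hj] at h

lemma mark_step' (counts : List Int) (a b i : Int) (hi : 0 ≤ i)
    (hp : 1 ≤ a) (hp2 : a ≤ (counts.length : Int))
    (hc : 1 ≤ b) (hc2 : b ≤ (counts.length : Int))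
    (f : Int) (hf : f = if a - 1 < b - 1 then 1 else -1) :
    prefN (PySem.List.pySetD
        (PySem.List.pySetD counts (a - 1) (PySem.List.pyGetD counts (a - 1) 0 + f)) (b - 1)
        (PySem.List.pyGetD
          (PySem.List.pySetD counts (a - 1) (PySem.List.pyGetD counts (a - 1) 0 + f)) (b - 1) 0 - f))
        (i.toNat + 1)
      = prefN counts (i.toNat + 1) + (if min a b ≤ i + 1 ∧ i + 1 ≤ max a b - 1 then 1 else 0) := by
  have hp0 : (0 : Int) ≤ a - 1 := by omega
  have hc0 : (0 : Int) ≤ b - 1 := by omega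
  have hpl : (a - 1).toNat < counts.length := by omega
  have hcl : (b - 1).toNat < counts.length := by omega
  rw [PySem.List.pySetD_of_nonneg _ _ hp0, pyGetD_toNat _ _ hp0,
      PySem.List.pySetD_of_nonneg _ _ hc0, pyGetD_toNat _ _ hc0]
  unfold prefN
  rw [sum_take_set _ _ _ _ (by simpa using hcl), sum_take_set _ _ _ _ hpl]
  simp only [show ((a - 1).toNat < i.toNat + 1) ↔ (a - 1 ≤ i) from by omega,
             show ((b - 1).toNat < i.toNat + 1) ↔ (b - 1 ≤ i) from by omega]
  rcases lt_trichotomy a b with h | h | h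
  · rw [show f = 1 from by rw [hf, if_pos (by omega)],
        min_eq_left (le_of_lt h), max_eq_right (le_of_lt h)]
    split_ifs <;> first | (exfalso; omega) | ring
  · rw [show f = -1 from by rw [hf, if_neg (by omega)], h, min_self, max_self]
    split_ifs <;> first | (exfalso; omega) | ring
  · rw [show f = -1 from by rw [hf, if_neg (by omega)],
        min_eq_right (le_of_lt h), max_eq_left (le_of_lt h)]
    split_ifs <;> first | (exfalso; omega) | ring

lemma mark_step (cities counts : List Int) (s i : Int) (hi : 0 ≤ i)
    (hp : 1 ≤ PySem.List.pyGetD cities (s - 1) 0)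
    (hp2 : PySem.List.pyGetD cities (s - 1) 0 ≤ (counts.length : Int))
    (hc : 1 ≤ PySem.List.pyGetD cities s 0)
    (hc2 : PySem.List.pyGetD cities s 0 ≤ (counts.length : Int)) :
    prefN (markBody cities counts s) (i.toNat + 1)
      = prefN counts (i.toNat + 1) + segInd cities i s := by
  exact mark_step' counts (PySem.List.pyGetD cities (s - 1) 0) (PySem.List.pyGetD cities s 0)
    i hi hp hp2 hc hc2 _ rfl

lemma mark_pref (cities : List Int) (n : ℕ) (L : List Int) : ∀ (counts : List Int) (i : Int),
    counts.length = n → 0 ≤ i →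
    (∀ s ∈ L, 1 ≤ PySem.List.pyGetD cities (s - 1) 0 ∧
              PySem.List.pyGetD cities (s - 1) 0 ≤ (n : Int) ∧
              1 ≤ PySem.List.pyGetD cities s 0 ∧
              PySem.List.pyGetD cities s 0 ≤ (n : Int)) →
    prefN (L.foldl (markBody cities) counts) (i.toNat + 1)
      = prefN counts (i.toNat + 1) + (L.map (segInd cities i)).sum := by
  induction L with
  | nil => intro counts i _ _ _; simp
  | cons s L ih =>
    intro counts i hlen hi hv
    simp only [List.foldl_cons, List.map_cons, List.sum_cons]
    rw [ih (markBody cities counts s) i (by rw [length_markBody, hlen]) hi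
        (fun t ht => hv t (List.mem_cons_of_mem _ ht))]
    have h := hv s (List.mem_cons_self ..)
    rw [mark_step cities counts s i hi h.1 (by rw [hlen]; exact h.2.1) h.2.2.1
        (by rw [hlen]; exact h.2.2.2)]
    ring

lemma seg_fold (cities : List Int) (i : Int) (L : List Int) : ∀ acc : Int,
    L.foldl (fun uses s =>
        let a := PySem.List.pyGetD cities (s - 1) 0
        let b := PySem.List.pyGetD cities s 0
        if min a b ≤ i + 1 ∧ i + 1 ≤ max a b - 1 then uses + 1 else uses) acc
      = acc + (L.map (segInd cities i)).sum := by
  induction L with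
  | nil => intro acc; simp
  | cons s L ih =>
    intro acc
    simp only [List.foldl_cons, List.map_cons, List.sum_cons, segInd]
    rw [ih]
    split <;> ring

lemma loop2 (counts : List Int) (g : Int → Int → Int) (U : Int → Int) :
    ∀ (n : ℕ) (a : Int), 0 ≤ a →
    (∀ i : Int, a ≤ i → i < a + n → U i = prefN counts (i.toNat + 1)) →
    ∀ ans : Int,
    ((PySem.List.pyRange a (a + n) 1).foldl (fun st i =>
        let cumulative := st.2 + PySem.List.pyGetD counts i 0
        (st.1 + g i cumulative, cumulative)) (ans, prefN counts a.toNat)).1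
      = (PySem.List.pyRange a (a + n) 1).foldl (fun t i => t + g i (U i)) ans := by
  intro n
  induction n with
  | zero =>
    intro a _ _ ans
    rw [show a + ((0 : ℕ) : Int) = a from by simp,
        PySem.List.pyRange_one_eq_nil le_rfl]
    rfl
  | succ n ih =>
    intro a ha hU ans
    have hcons : PySem.List.pyRange a (a + ((n + 1 : ℕ) : Int)) 1
        = a :: PySem.List.pyRange (a + 1) (a + ((n + 1 : ℕ) : Int)) 1 :=
      PySem.List.pyRange_one_cons (by push_cast; omega)
    rw [hcons]
    simp only [List.foldl_cons]
    have hget : PySem.List.pyGetD counts a 0 = counts.getD a.toNat 0 := pyGetD_toNat _ _ ha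
    have hcum : prefN counts a.toNat + PySem.List.pyGetD counts a 0
        = prefN counts ((a + 1).toNat) := by
      rw [hget, getD_eq_prefN_sub, show (a + 1).toNat = a.toNat + 1 from by omega]
      ring
    have hrange : a + ((n + 1 : ℕ) : Int) = (a + 1) + ((n : ℕ) : Int) := by push_cast; ring
    rw [hrange, hcum]
    have hUa : g a (prefN counts ((a + 1).toNat)) = g a (U a) := by
      rw [hU a le_rfl (by push_cast; omega),
          show (a + 1).toNat = a.toNat + 1 from by omega]
    rw [hUa]
    exact ih (a + 1) (by omega)
      (fun i h1 h2 => hU i (by omega) (by push_cast at h2 ⊢; omega)) (ans + g a (U a))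

lemma city_bound (cities : List Int) (N M : Int)
    (hc : ∀ c ∈ cities.take M.toNat, 1 ≤ c ∧ c ≤ N)
    (hMlen : M ≤ (cities.length : Int)) (j : Int) (h0 : 0 ≤ j) (hj : j < M) :
    1 ≤ PySem.List.pyGetD cities j 0 ∧ PySem.List.pyGetD cities j 0 ≤ N := by
  have hjl : j.toNat < cities.length := by omega
  rw [pyGetD_toNat _ _ h0, List.getD_eq_getElem?_getD, List.getElem?_eq_getElem hjl]
  simp only [Option.getD_some]
  apply hc
  have htl : j.toNat < (cities.take M.toNat).length := by
    simp only [List.length_take]; omega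
  have he := List.getElem_take (xs := cities) (j := M.toNat) (i := j.toNat) (h := htl)
  rw [← he]
  exact List.getElem_mem htl

-- ===== VERDICT (by name: the statement is the Claim_ definition above) =====
theorem solution_spec : Claim_equal_solution := by
  intro N M cities costs hdom hpre
  obtain ⟨hMB, hclen, hrows⟩ := hpre
  unfold Spec_solution
  have hvb : ∀ s ∈ PySem.List.pyRange 1 M 1,
      1 ≤ PySem.List.pyGetD cities (s - 1) 0 ∧
      PySem.List.pyGetD cities (s - 1) 0 ≤ (((N + 1).toNat : ℕ) : Int) ∧
      1 ≤ PySem.List.pyGetD cities s 0 ∧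
      PySem.List.pyGetD cities s 0 ≤ (((N + 1).toNat : ℕ) : Int) := by
    intro s hs
    rw [PySem.List.mem_pyRange_one] at hs
    obtain ⟨hMlen, hcity⟩ := hMB (by omega)
    have h1 := city_bound cities (N + 1) M hcity hMlen (s - 1) (by omega) (by omega)
    have h2 := city_bound cities (N + 1) M hcity hMlen s (by omega) (by omega)
    have hcast : (((N + 1).toNat : ℕ) : Int) = N + 1 := by omega
    rw [hcast]
    exact ⟨h1.1, by omega, h2.1, by omega⟩
  have hUP : ∀ i : Int, 0 ≤ i → i < 0 + (((N - 1).toNat : ℕ) : Int) →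
      (fun i : Int => (PySem.List.pyRange 1 M 1).foldl (fun uses s =>
        let a := PySem.List.pyGetD cities (s - 1) 0
        let b := PySem.List.pyGetD cities s 0
        if min a b ≤ i + 1 ∧ i + 1 ≤ max a b - 1 then uses + 1 else uses) 0) i = prefN ((PySem.List.pyRange 1 M 1).foldl (markBody cities) (List.replicate (N + 1).toNat 0)) (i.toNat + 1) := by
    intro i hi _
    have hseg := seg_fold cities i (PySem.List.pyRange 1 M 1) 0
    have hmark := mark_pref cities (N + 1).toNat (PySem.List.pyRange 1 M 1)
      (List.replicate (N + 1).toNat 0) i (by simp) hi hvb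
    have hz : prefN (List.replicate (N + 1).toNat (0 : Int)) (i.toNat + 1) = 0 := by
      simp [prefN, List.take_replicate]
    rw [hz, zero_add] at hmark
    calc (fun i : Int => (PySem.List.pyRange 1 M 1).foldl (fun uses s =>
        let a := PySem.List.pyGetD cities (s - 1) 0
        let b := PySem.List.pyGetD cities s 0
        if min a b ≤ i + 1 ∧ i + 1 ≤ max a b - 1 then uses + 1 else uses) 0) i
        = 0 + ((PySem.List.pyRange 1 M 1).map (segInd cities i)).sum := hseg
      _ = prefN ((PySem.List.pyRange 1 M 1).foldl (markBody cities) (List.replicate (N + 1).toNat 0)) (i.toNat + 1) := by rw [hmark, zero_add]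
  by_cases hle : N - 1 ≤ 0
  · have e : PySem.List.pyRange 0 (N - 1) 1 = [] := PySem.List.pyRange_one_eq_nil (by omega)
    rw [show solution N M cities costs = (((PySem.List.pyRange 0 (N - 1) 1).foldl (fun st i =>
      let cumulative := st.2 + PySem.List.pyGetD ((PySem.List.pyRange 1 M 1).foldl (markBody cities) (List.replicate (N + 1).toNat 0)) i 0
      (st.1 + min (cumulative * PySem.List.pyGetD (PySem.List.pyGetD costs i []) 0 0)
                  (PySem.List.pyGetD (PySem.List.pyGetD costs i []) 2 0 +
                   PySem.List.pyGetD (PySem.List.pyGetD costs i []) 1 0 * cumulative),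
       cumulative)) ((0 : Int), (0 : Int))).1) from rfl,
        show solution_alt N M cities costs = ((PySem.List.pyRange 0 (N - 1) 1).foldl (fun total i =>
    let uses := (PySem.List.pyRange 1 M 1).foldl (fun uses s =>
        let a := PySem.List.pyGetD cities (s - 1) 0
        let b := PySem.List.pyGetD cities s 0
        if min a b ≤ i + 1 ∧ i + 1 ≤ max a b - 1 then uses + 1 else uses) 0
    total + min (uses * PySem.List.pyGetD (PySem.List.pyGetD costs i []) 0 0)
                (PySem.List.pyGetD (PySem.List.pyGetD costs i []) 2 0 +
                 PySem.List.pyGetD (PySem.List.pyGetD costs i []) 1 0 * uses)) 0) from rfl, e]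
    rfl
  · have hlt : 0 < N - 1 := by omega
    have hl := loop2 ((PySem.List.pyRange 1 M 1).foldl (markBody cities) (List.replicate (N + 1).toNat 0)) (fun i u : Int => min (u * PySem.List.pyGetD (PySem.List.pyGetD costs i []) 0 0)
      (PySem.List.pyGetD (PySem.List.pyGetD costs i []) 2 0 +
       PySem.List.pyGetD (PySem.List.pyGetD costs i []) 1 0 * u)) (fun i : Int => (PySem.List.pyRange 1 M 1).foldl (fun uses s =>
        let a := PySem.List.pyGetD cities (s - 1) 0
        let b := PySem.List.pyGetD cities s 0
        if min a b ≤ i + 1 ∧ i + 1 ≤ max a b - 1 then uses + 1 else uses) 0) (N - 1).toNat 0 le_rfl hUP 0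
    have h0pref : prefN ((PySem.List.pyRange 1 M 1).foldl (markBody cities) (List.replicate (N + 1).toNat 0)) ((0 : Int).toNat) = 0 := by simp [prefN]
    rw [h0pref] at hl
    have hNre : (N - 1 : Int) = 0 + (((N - 1).toNat : ℕ) : Int) := by omega
    rw [show solution N M cities costs = (((PySem.List.pyRange 0 (N - 1) 1).foldl (fun st i =>
      let cumulative := st.2 + PySem.List.pyGetD ((PySem.List.pyRange 1 M 1).foldl (markBody cities) (List.replicate (N + 1).toNat 0)) i 0
      (st.1 + min (cumulative * PySem.List.pyGetD (PySem.List.pyGetD costs i []) 0 0)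
                  (PySem.List.pyGetD (PySem.List.pyGetD costs i []) 2 0 +
                   PySem.List.pyGetD (PySem.List.pyGetD costs i []) 1 0 * cumulative),
       cumulative)) ((0 : Int), (0 : Int))).1) from rfl,
        show solution_alt N M cities costs = ((PySem.List.pyRange 0 (N - 1) 1).foldl (fun total i =>
    let uses := (PySem.List.pyRange 1 M 1).foldl (fun uses s =>
        let a := PySem.List.pyGetD cities (s - 1) 0
        let b := PySem.List.pyGetD cities s 0
        if min a b ≤ i + 1 ∧ i + 1 ≤ max a b - 1 then uses + 1 else uses) 0
    total + min (uses * PySem.List.pyGetD (PySem.List.pyGetD costs i []) 0 0)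
                (PySem.List.pyGetD (PySem.List.pyGetD costs i []) 2 0 +
                 PySem.List.pyGetD (PySem.List.pyGetD costs i []) 1 0 * uses)) 0) from rfl, hNre]
    exact hl
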